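-- pv_equiv track=rewrite | github.com/ggjk26/PyUTAU | embedded_utau/voice_library.py | is_similar_pronunciation
-- ===== SOURCE A (Python) =====
-- def is_similar_pronunciation(lyric1: str, lyric2: str) -> bool:
--     """判断两个歌词是否发音相似"""
--     if len(lyric1) == 0 or len(lyric2) == 0:
--         return False
--
--     # 发音相似性映射（简化的实现）
--     pronunciation_groups = {
--         'a': ['a', 'ah', 'aa'],
--         'i': ['i', 'ee', 'ii'],
--         'u': ['u', 'oo', 'uu'],
--         'e': ['e', 'eh'],
--         'o': ['o', 'oh'],
--         'ka': ['ka', 'ca'],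
--         'ki': ['ki', 'key'],
--         'ku': ['ku', 'coo'],
--         'ke': ['ke', 'kay'],
--         'ko': ['ko', 'co'],
--     }
--
--     lyric1_lower = lyric1.lower()
--     lyric2_lower = lyric2.lower()
--
--     for group in pronunciation_groups.values():
--         if lyric1_lower in group and lyric2_lower in group:
--             return True
--
--     return False
-- ===== SOURCE B (Python) =====
-- # B: one flat literal table assigning each variant an integer group id; two lookups, no scan.
-- _GROUP_OF = {
--     'a': 1, 'ah': 1, 'aa': 1,
--     'i': 2, 'ee': 2, 'ii': 2,
--     'u': 3, 'oo': 3, 'uu': 3,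
--     'e': 4, 'eh': 4,
--     'o': 5, 'oh': 5,
--     'ka': 6, 'ca': 6,
--     'ki': 7, 'key': 7,
--     'ku': 8, 'coo': 8,
--     'ke': 9, 'kay': 9,
--     'ko': 10, 'co': 10,
-- }
--
--
-- def is_similar_pronunciation(lyric1: str, lyric2: str) -> bool:
--     """判断两个歌词是否发音相似"""
--     if not lyric1 or not lyric2:
--         return False
--     g1 = _GROUP_OF.get(lyric1.lower())
--     return g1 is not None and g1 == _GROUP_OF.get(lyric2.lower())
-- ===== Notes on version B (the rewrite author's own statement) =====
-- stated objective: idiomatic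
-- what changed: Replaced the per-call scan over all pronunciation groups (two membership tests per group) with a single flat module-level dict mapping each variant directly to an integer group id, so the function is two dict lookups and an id comparison with no group structure at all.
import Mathlib
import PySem

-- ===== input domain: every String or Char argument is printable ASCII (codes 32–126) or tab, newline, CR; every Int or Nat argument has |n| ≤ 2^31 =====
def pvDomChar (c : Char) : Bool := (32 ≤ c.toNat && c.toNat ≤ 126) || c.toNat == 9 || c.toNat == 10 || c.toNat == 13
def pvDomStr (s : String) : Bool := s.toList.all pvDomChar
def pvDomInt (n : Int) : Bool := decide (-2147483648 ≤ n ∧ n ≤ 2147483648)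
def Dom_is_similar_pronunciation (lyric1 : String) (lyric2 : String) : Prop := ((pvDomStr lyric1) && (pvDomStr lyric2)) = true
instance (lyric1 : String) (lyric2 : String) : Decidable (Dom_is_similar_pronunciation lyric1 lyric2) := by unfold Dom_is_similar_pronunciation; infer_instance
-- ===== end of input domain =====

-- B replaces A's per-call scan over the group table with one flat dict mapping each variant
-- to an integer group id and two lookups (idiomatic); the return value is proved identical.

-- ===== PORT A =====
-- the dict literal 'pronunciation_groups' of A; the loop iterates over its .values()
def pvGroupsA : List (String × List String) :=
  [("a", ["a", "ah", "aa"]), ("i", ["i", "ee", "ii"]), ("u", ["u", "oo", "uu"]),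
   ("e", ["e", "eh"]), ("o", ["o", "oh"]), ("ka", ["ka", "ca"]), ("ki", ["ki", "key"]),
   ("ku", ["ku", "coo"]), ("ke", ["ke", "kay"]), ("ko", ["ko", "co"])]

-- 'for group in pronunciation_groups.values(): if lyric1_lower in group and lyric2_lower in group: return True'
def pvSimLoop (s1 s2 : String) : List (List String) → Bool
  | [] => false
  | g :: rest => if g.contains s1 && g.contains s2 then true else pvSimLoop s1 s2 rest

def is_similar_pronunciation (lyric1 : String) (lyric2 : String) : Bool :=
  if PySem.Str.len lyric1 == 0 || PySem.Str.len lyric2 == 0 then false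
  else
    pvSimLoop (PySem.Str.lower lyric1) (PySem.Str.lower lyric2) (pvGroupsA.map Prod.snd)

-- ===== PORT B =====
-- B's flat module-level dict literal '_GROUP_OF' (variant -> integer group id)
def pvGroupOf : PySem.Dict String Int :=
  PySem.Dict.mk
    [("a", 1), ("ah", 1), ("aa", 1),
     ("i", 2), ("ee", 2), ("ii", 2),
     ("u", 3), ("oo", 3), ("uu", 3),
     ("e", 4), ("eh", 4),
     ("o", 5), ("oh", 5),
     ("ka", 6), ("ca", 6),
     ("ki", 7), ("key", 7),
     ("ku", 8), ("coo", 8),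
     ("ke", 9), ("kay", 9),
     ("ko", 10), ("co", 10)]

def is_similar_pronunciation_alt (lyric1 : String) (lyric2 : String) : Bool :=
  if lyric1 == "" || lyric2 == "" then false
  else
    match pvGroupOf.get? (PySem.Str.lower lyric1) with
    | none => false
    | some g1 => pvGroupOf.get? (PySem.Str.lower lyric2) == some g1

-- ===== PRECONDITION & SPEC =====
def Spec_is_similar_pronunciation (lyric1 : String) (lyric2 : String) (out : Bool) : Prop := out = is_similar_pronunciation_alt lyric1 lyric2
instance (lyric1 : String) (lyric2 : String) (out : Bool) : Decidable (Spec_is_similar_pronunciation lyric1 lyric2 out) := by unfold Spec_is_similar_pronunciation; infer_instance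

-- ===== CLAIM (what is proved, stated in full; the proofs are below) =====
def Claim_equal_is_similar_pronunciation : Prop := ∀ (lyric1 : String) (lyric2 : String), Dom_is_similar_pronunciation lyric1 lyric2 → Spec_is_similar_pronunciation lyric1 lyric2 (is_similar_pronunciation lyric1 lyric2)

-- ===== LEMMAS AND PROOFS =====

-- A's group table re-keyed by the integer group ids B assigns (a proof device only)
def pvGroupsI : List (Int × List String) :=
  [(1, ["a", "ah", "aa"]), (2, ["i", "ee", "ii"]), (3, ["u", "oo", "uu"]),
   (4, ["e", "eh"]), (5, ["o", "oh"]), (6, ["ka", "ca"]), (7, ["ki", "key"]),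
   (8, ["ku", "coo"]), (9, ["ke", "kay"]), (10, ["ko", "co"])]

-- the flat association list {variant: id} a group table denotes
def pvFlat (gs : List (Int × List String)) : List (String × Int) :=
  gs.flatMap (fun kv => kv.2.map (fun v => (v, kv.1)))

theorem pv_get_group (vs : List String) (k : Int) (t : List (String × Int)) (s : String) :
    (PySem.Dict.mk (vs.map (fun v => (v, k)) ++ t)).get? s =
      if vs.contains s then some k else (PySem.Dict.mk t).get? s := by
  induction vs with
  | nil => simp
  | cons v vs ih =>
      simp only [List.map_cons, List.cons_append, PySem.Dict.get?_mk_cons, List.contains_cons]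
      by_cases h : v = s
      · subst h; simp
      · simp [h, ih, BEq.symm_false]

theorem pv_loop_false_left (s1 s2 : String) (gs : List (Int × List String))
    (h : ∀ g ∈ gs, s1 ∉ g.2) : pvSimLoop s1 s2 (gs.map Prod.snd) = false := by
  induction gs with
  | nil => rfl
  | cons g gs ih =>
      have h1 : s1 ∉ g.2 := h g (by simp)
      simp only [List.map_cons, pvSimLoop]
      rw [if_neg]
      · exact ih (fun g hg => h g (by simp [hg]))
      · simp [h1]

theorem pv_loop_false_right (s1 s2 : String) (gs : List (Int × List String))
    (h : ∀ g ∈ gs, s2 ∉ g.2) : pvSimLoop s1 s2 (gs.map Prod.snd) = false := by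
  induction gs with
  | nil => rfl
  | cons g gs ih =>
      have h1 : s2 ∉ g.2 := h g (by simp)
      simp only [List.map_cons, pvSimLoop]
      rw [if_neg]
      · exact ih (fun g hg => h g (by simp [hg]))
      · simp [h1]

theorem pv_flat_snd_mem (gs : List (Int × List String)) (v : Int)
    (h : v ∈ (pvFlat gs).map Prod.snd) : v ∈ gs.map Prod.fst := by
  induction gs with
  | nil => simp [pvFlat] at h
  | cons g gs ih =>
      simp only [pvFlat, List.flatMap_cons, List.map_append, List.mem_append, List.map_map] at h
      simp only [List.map_cons, List.mem_cons]
      rcases h with h | h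
      · left; simp at h; obtain ⟨a, -, rfl⟩ := h; rfl
      · right; exact ih (by simpa [pvFlat] using h)

-- A's scan over a group table agrees with two lookups in the flat variant->id table, provided
-- the ids are distinct and the variant lists are globally duplicate-free.
theorem pv_loop_eq (s1 s2 : String) (gs : List (Int × List String))
    (hk : (gs.map Prod.fst).Nodup) (hv : (gs.flatMap Prod.snd).Nodup) :
    pvSimLoop s1 s2 (gs.map Prod.snd) =
      (match (PySem.Dict.mk (pvFlat gs)).get? s1 with
       | none => false
       | some g1 => (PySem.Dict.mk (pvFlat gs)).get? s2 == some g1) := by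
  induction gs with
  | nil => rfl
  | cons g gs ih =>
      obtain ⟨k, vs⟩ := g
      have hflat : pvFlat ((k, vs) :: gs) = vs.map (fun v => (v, k)) ++ pvFlat gs := by
        simp [pvFlat]
      simp only [List.map_cons, pvSimLoop, hflat, pv_get_group]
      simp only [List.map_cons, List.flatMap_cons, List.nodup_cons, List.nodup_append] at hk hv
      obtain ⟨hknot, hktail⟩ := hk
      obtain ⟨hvs, hrest, hdisj⟩ := hv
      have keyOf : ∀ v : Int, (PySem.Dict.mk (pvFlat gs)).get? s2 = some v → v ≠ k := by
        intro v hg hvk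
        exact hknot (hvk ▸ pv_flat_snd_mem gs v
          (List.mem_map.mpr ⟨(s2, v), PySem.Dict.mem_items_of_get?_eq_some _ hg, rfl⟩))
      have keyOf1 : ∀ v : Int, (PySem.Dict.mk (pvFlat gs)).get? s1 = some v → v ≠ k := by
        intro v hg hvk
        exact hknot (hvk ▸ pv_flat_snd_mem gs v
          (List.mem_map.mpr ⟨(s1, v), PySem.Dict.mem_items_of_get?_eq_some _ hg, rfl⟩))
      by_cases m1 : s1 ∈ vs <;> by_cases m2 : s2 ∈ vs
      · simp [m1, m2]
      · have hnot1 : ∀ g ∈ gs, s1 ∉ g.2 := fun g hg hmem =>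
          hdisj s1 m1 s1 (List.mem_flatMap.mpr ⟨g, hg, hmem⟩) rfl
        rw [pv_loop_false_left s1 s2 gs hnot1]
        cases hg : (PySem.Dict.mk (pvFlat gs)).get? s2 with
        | none => simp [m1, m2]
        | some v => simp [m1, m2, keyOf v hg]
      · have hnot2 : ∀ g ∈ gs, s2 ∉ g.2 := fun g hg hmem =>
          hdisj s2 m2 s2 (List.mem_flatMap.mpr ⟨g, hg, hmem⟩) rfl
        rw [pv_loop_false_right s1 s2 gs hnot2]
        cases hg : (PySem.Dict.mk (pvFlat gs)).get? s1 with
        | none => simp [m1, m2]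
        | some v => simp [m1, m2, Ne.symm (keyOf1 v hg)]
      · have := ih hktail hrest
        simpa [m1, m2] using this

theorem pv_guard (s : String) : (PySem.Str.len s == 0) = (s == "") := by
  simp [PySem.Str.len]

-- re-keying A's table by the integer ids keeps the variant lists
theorem pv_snd : pvGroupsA.map Prod.snd = pvGroupsI.map Prod.snd := by decide

-- the flat table of the re-keyed groups is exactly B's dict literal
theorem pv_table : PySem.Dict.mk (pvFlat pvGroupsI) = pvGroupOf := by decide

-- ===== VERDICT (by name: the statement is the Claim_ definition above) =====
theorem is_similar_pronunciation_spec : Claim_equal_is_similar_pronunciation := by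
  intro l1 l2 _
  unfold Spec_is_similar_pronunciation is_similar_pronunciation is_similar_pronunciation_alt
  rw [pv_guard, pv_guard]
  by_cases he : (l1 == "" || l2 == "") = true
  · rw [if_pos he, if_pos he]
  · rw [if_neg he, if_neg he, pv_snd,
      pv_loop_eq (PySem.Str.lower l1) (PySem.Str.lower l2) pvGroupsI (by decide) (by decide),
      pv_table]
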